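-- pv_equiv track=rewrite | github.com/Psychohistorian11/Estructuras_De_Datos_dinamicas | Recursividad/Ejercicios/Ejercicio23.py | sumarComponentesDeArray
-- ===== SOURCE A (Python) =====
-- def sumarComponentesDeArray(array, siguienteArray=None):
--     if siguienteArray is None:
--         siguienteArray = []
--     if len(array) == 1:
--         return array
--     else:
--         siguienteArray.append(array[0] + array[1])
--         sumarComponentesDeArray(array[1:], siguienteArray)
--         return siguienteArray
-- ===== SOURCE B (Python) =====
-- def sumarComponentesDeArray(array, siguienteArray=None):
--     if siguienteArray is None:
--         siguienteArray = []
--     if len(array) == 1: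
--         return array
--     prev = array[0]
--     for x in array[1:]:
--         siguienteArray.append(prev + x)
--         prev = x
--     return siguienteArray
-- ===== Notes on version B (the rewrite author's own statement) =====
-- stated objective: faster
-- what changed: Replaces the recursion (which re-slices array[1:] at every level and recurses n deep) with a single iterative loop over the tail keeping a running-previous variable.
import Mathlib
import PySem

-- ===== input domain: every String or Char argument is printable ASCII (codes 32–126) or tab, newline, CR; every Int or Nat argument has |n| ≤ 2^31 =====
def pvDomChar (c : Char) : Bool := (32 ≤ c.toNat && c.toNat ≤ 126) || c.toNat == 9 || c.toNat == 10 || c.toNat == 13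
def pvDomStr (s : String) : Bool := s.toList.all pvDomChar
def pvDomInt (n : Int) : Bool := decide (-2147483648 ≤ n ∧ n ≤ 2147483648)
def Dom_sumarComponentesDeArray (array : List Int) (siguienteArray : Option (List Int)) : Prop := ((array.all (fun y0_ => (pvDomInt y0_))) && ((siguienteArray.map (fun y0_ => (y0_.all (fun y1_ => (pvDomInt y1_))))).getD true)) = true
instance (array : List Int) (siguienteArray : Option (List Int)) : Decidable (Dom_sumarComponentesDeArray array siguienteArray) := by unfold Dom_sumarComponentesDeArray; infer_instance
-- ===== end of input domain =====

-- B replaces A's recursion (which copies array[1:] at every level) with one iterative pass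
-- keeping a running-previous variable; both mutate/return the caller's siguienteArray list —
-- the equivalence proved here is about the RETURN value only.

-- ===== PORT A =====
-- recursive accumulation: while len(array) > 1, append array[0]+array[1] and recurse on array[1:]
def sumarAuxA (array : List Int) (s : List Int) : List Int :=
  match array with
  | a :: b :: rest => sumarAuxA (b :: rest) (s ++ [a + b])
  | _ => s

def sumarComponentesDeArray (array : List Int) (siguienteArray : Option (List Int)) : List Int :=
  let s := siguienteArray.getD []
  if array.length = 1 then array
  else sumarAuxA array s

-- ===== PORT B =====
def sumarComponentesDeArray_alt (array : List Int) (siguienteArray : Option (List Int)) : List Int :=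
  let s := siguienteArray.getD []
  if array.length = 1 then array
  else
    match array with
    | [] => s  -- Python raises IndexError here (prev = array[0]); excluded by Pre_
    | prev :: rest =>
      (rest.foldl (fun (acc : List Int × Int) x => (acc.1 ++ [acc.2 + x], x)) (s, prev)).1

-- ===== PRECONDITION & SPEC =====
-- Pre_ excludes the empty array, on which both Pythons raise IndexError.
def Pre_sumarComponentesDeArray (array : List Int) (siguienteArray : Option (List Int)) : Prop := array ≠ []
instance (array : List Int) (siguienteArray : Option (List Int)) : Decidable (Pre_sumarComponentesDeArray array siguienteArray) := by unfold Pre_sumarComponentesDeArray; infer_instance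
def pvWitness_sumarComponentesDeArray : List Int × Option (List Int) := ([1, 2, 3], some [7])

def Spec_sumarComponentesDeArray (array : List Int) (siguienteArray : Option (List Int)) (out : List Int) : Prop := out = sumarComponentesDeArray_alt array siguienteArray
instance (array : List Int) (siguienteArray : Option (List Int)) (out : List Int) : Decidable (Spec_sumarComponentesDeArray array siguienteArray out) := by unfold Spec_sumarComponentesDeArray; infer_instance

-- ===== CLAIM (what is proved, stated in full; the proofs are below) =====
def Claim_equal_sumarComponentesDeArray : Prop := ∀ (array : List Int) (siguienteArray : Option (List Int)), Dom_sumarComponentesDeArray array siguienteArray → Pre_sumarComponentesDeArray array siguienteArray → Spec_sumarComponentesDeArray array siguienteArray (sumarComponentesDeArray array siguienteArray)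

-- ===== LEMMAS AND PROOFS =====
theorem sumarAuxA_eq_foldl (rest : List Int) (prev : Int) (s : List Int) :
    sumarAuxA (prev :: rest) s
      = (rest.foldl (fun (acc : List Int × Int) x => (acc.1 ++ [acc.2 + x], x)) (s, prev)).1 := by
  induction rest generalizing prev s with
  | nil => simp [sumarAuxA]
  | cons x xs ih => simp [sumarAuxA, List.foldl, ih]

-- ===== VERDICT (by name: the statement is the Claim_ definition above) =====
theorem sumarComponentesDeArray_spec : Claim_equal_sumarComponentesDeArray := by
  intro array siguienteArray _ hpre
  unfold Spec_sumarComponentesDeArray sumarComponentesDeArray sumarComponentesDeArray_alt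
  cases array with
  | nil => exact absurd rfl hpre
  | cons p rest =>
    by_cases h : (p :: rest).length = 1 <;> simp [h, sumarAuxA_eq_foldl]
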